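-- pv_equiv track=rewrite | github.com/ibrakap/So-simple | Python3/upper.py | doupper
-- ===== SOURCE A (Python) =====
-- upper = ["A","B","C","D","E","F","G","H","I","J","K","L","M","N","O","P","Q","R","S","T","U","V","W","X","Y","Z"]
--
-- lower= ["a","b","c","d","e","f","g","h","i","j","k","l","m","n","o","p","q","r","s","t","u","v","w","x","y","z"]
--
-- def doupper(text):
-- 	temp=""
-- 	for i in text:
-- 		for a in range(len(lower)):
-- 			if i == lower[a]:
-- 				temp += upper[a]
--
-- 		else:
-- 			for f in range(len(upper)):
-- 				if i == upper[f]: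
-- 					temp += upper[f]
-- 	return temp
-- ===== SOURCE B (Python) =====
-- def doupper(text):
--     letters = [c for c in text if 'A' <= c <= 'Z' or 'a' <= c <= 'z']
--     return ''.join(letters).upper()
-- ===== Notes on version B (the rewrite author's own statement) =====
-- stated objective: faster
-- what changed: Replaces A's per-character scan of two 26-entry alphabet tables with a single filter pass keeping ASCII letters followed by one str.upper() over the filtered string.
import Mathlib
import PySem

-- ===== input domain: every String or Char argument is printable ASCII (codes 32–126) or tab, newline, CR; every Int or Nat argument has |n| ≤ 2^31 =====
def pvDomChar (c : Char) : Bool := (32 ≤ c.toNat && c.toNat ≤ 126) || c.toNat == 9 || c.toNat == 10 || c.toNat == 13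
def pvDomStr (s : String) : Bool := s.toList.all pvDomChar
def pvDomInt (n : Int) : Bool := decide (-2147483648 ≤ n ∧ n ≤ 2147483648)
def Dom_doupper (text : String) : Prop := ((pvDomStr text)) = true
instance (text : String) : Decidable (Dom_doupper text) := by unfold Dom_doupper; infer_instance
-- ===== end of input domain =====

-- B replaces A's 52 table comparisons per character by one filter pass keeping ASCII letters
-- followed by a single upper() over the filtered string (objective: faster, constant factor).

-- ===== PORT A =====
def pvUpperTab : List Char :=
  ['A','B','C','D','E','F','G','H','I','J','K','L','M',
   'N','O','P','Q','R','S','T','U','V','W','X','Y','Z']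
def pvLowerTab : List Char :=
  ['a','b','c','d','e','f','g','h','i','j','k','l','m',
   'n','o','p','q','r','s','t','u','v','w','x','y','z']

-- literal port of A: for each character, scan lower by index (emit upper[a] on match),
-- then — Python's for/else always runs the else — scan upper by index (emit upper[f] on match)
def doupper (text : String) : String :=
  String.ofList <| text.toList.foldl (fun temp i =>
    let temp := (List.range pvLowerTab.length).foldl
      (fun t a => if i == pvLowerTab.getD a ' ' then t ++ [pvUpperTab.getD a ' '] else t) temp
    (List.range pvUpperTab.length).foldl
      (fun t f => if i == pvUpperTab.getD f ' ' then t ++ [pvUpperTab.getD f ' '] else t) temp) []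

-- ===== PORT B =====
def doupper_alt (text : String) : String :=
  let letters := text.toList.filter (fun c => ('A' ≤ c && c ≤ 'Z') || ('a' ≤ c && c ≤ 'z'))
  PySem.Str.upper (String.ofList letters)

-- ===== PRECONDITION & SPEC =====
def Spec_doupper (text : String) (out : String) : Prop := out = doupper_alt text
instance (text : String) (out : String) : Decidable (Spec_doupper text out) := by unfold Spec_doupper; infer_instance

-- ===== CLAIM (what is proved, stated in full; the proofs are below) =====
def Claim_equal_doupper : Prop := ∀ (text : String), Dom_doupper text → Spec_doupper text (doupper text)

-- ===== LEMMAS AND PROOFS =====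

-- what A emits for one character c (both inner loops, via foldl_append_if):
-- exactly [upperChar c] when c is an ASCII letter, nothing otherwise
theorem pv_emit (c : Char) (hc : c.toNat ≤ 126) :
    (((List.range pvLowerTab.length).filter (fun a => c == pvLowerTab.getD a ' ')).map
        (fun a => pvUpperTab.getD a ' ')) ++
    (((List.range pvUpperTab.length).filter (fun f => c == pvUpperTab.getD f ' ')).map
        (fun f => pvUpperTab.getD f ' '))
    = if ('A' ≤ c && c ≤ 'Z') || ('a' ≤ c && c ≤ 'z') then [PySem.Chars.upperChar c] else [] := by
  obtain ⟨n, rfl, hn⟩ : ∃ n, Char.ofNat n = c ∧ n ≤ 126 :=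
    ⟨c.toNat, Char.ofNat_toNat c, hc⟩
  interval_cases n <;> decide

theorem pv_main (cs : List Char) (h : ∀ c ∈ cs, c.toNat ≤ 126) (acc : List Char) :
    cs.foldl (fun temp i =>
      let temp := (List.range pvLowerTab.length).foldl
        (fun t a => if i == pvLowerTab.getD a ' ' then t ++ [pvUpperTab.getD a ' '] else t) temp
      (List.range pvUpperTab.length).foldl
        (fun t f => if i == pvUpperTab.getD f ' ' then t ++ [pvUpperTab.getD f ' '] else t) temp) acc
    = acc ++ PySem.Chars.upper
        (cs.filter (fun c => ('A' ≤ c && c ≤ 'Z') || ('a' ≤ c && c ≤ 'z'))) := by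
  induction cs generalizing acc with
  | nil => simp [PySem.Chars.upper]
  | cons c cs ih =>
    have hc : c.toNat ≤ 126 := h c (List.mem_cons_self ..)
    simp only [List.foldl_cons]
    rw [PySem.List.foldl_append_if (fun a => c == pvLowerTab.getD a ' ')
          (fun a => pvUpperTab.getD a ' '),
        PySem.List.foldl_append_if (fun f => c == pvUpperTab.getD f ' ')
          (fun f => pvUpperTab.getD f ' '),
        List.append_assoc, pv_emit c hc,
        ih (fun x hx => h x (List.mem_cons_of_mem _ hx))]
    by_cases hp : (('A' ≤ c && c ≤ 'Z') || ('a' ≤ c && c ≤ 'z')) = true <;>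
      simp [hp, PySem.Chars.upper]

-- ===== VERDICT (by name: the statement is the Claim_ definition above) =====
theorem doupper_spec : Claim_equal_doupper := by
  intro text hdom
  have hall : ∀ c ∈ text.toList, c.toNat ≤ 126 := by
    intro c hcmem
    have := List.all_eq_true.mp hdom c hcmem
    simp only [pvDomChar, Bool.or_eq_true, Bool.and_eq_true, decide_eq_true_eq,
      beq_iff_eq] at this
    omega
  show doupper text = doupper_alt text
  unfold doupper doupper_alt
  rw [pv_main text.toList hall []]
  simp [PySem.Str.upper]
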